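-- pv_equiv track=rewrite | github.com/wilfredor/familybook-cli | familybook_mirror.py | _filter_connection_paths
-- ===== SOURCE A (Python) =====
-- from typing import Any, Dict, List, Optional
--
-- def _filter_connection_paths(raw_paths: List[tuple[List[str], List[str]]]) -> List[tuple[List[str], List[str]]]:
--     if not raw_paths:
--         return []
--     shortest_length = min(len(edges) for _, edges in raw_paths)
--     filtered = [(nodes, edges) for nodes, edges in raw_paths if len(edges) == shortest_length]
--     unique: List[tuple[List[str], List[str]]] = []
--     seen_signatures: set[tuple[str, ...]] = set()
--     for nodes, edges in filtered:
--         signature = tuple(nodes)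
--         if signature in seen_signatures:
--             continue
--         seen_signatures.add(signature)
--         unique.append((nodes, edges))
--     return unique
-- ===== SOURCE B (Python) =====
-- from typing import List
--
--
-- def _filter_connection_paths(raw_paths: List[tuple[List[str], List[str]]]) -> List[tuple[List[str], List[str]]]:
--     current_min = None
--     seen = set()
--     unique: List[tuple[List[str], List[str]]] = []
--     for nodes, edges in raw_paths:
--         n = len(edges)
--         if current_min is None or n < current_min:
--             current_min = n
--             seen = {tuple(nodes)}
--             unique = [(nodes, edges)]
--         elif n == current_min:
--             signature = tuple(nodes)
--             if signature not in seen: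
--                 seen.add(signature)
--                 unique.append((nodes, edges))
--     return unique
-- ===== Notes on version B (the rewrite author's own statement) =====
-- stated objective: alternative
-- what changed: Replaced A's three passes (min over all edge lengths, then a filter, then a dedup loop) by one online pass that keeps the current minimum and resets the seen-set and result list whenever a strictly shorter path appears.
import Mathlib
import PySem

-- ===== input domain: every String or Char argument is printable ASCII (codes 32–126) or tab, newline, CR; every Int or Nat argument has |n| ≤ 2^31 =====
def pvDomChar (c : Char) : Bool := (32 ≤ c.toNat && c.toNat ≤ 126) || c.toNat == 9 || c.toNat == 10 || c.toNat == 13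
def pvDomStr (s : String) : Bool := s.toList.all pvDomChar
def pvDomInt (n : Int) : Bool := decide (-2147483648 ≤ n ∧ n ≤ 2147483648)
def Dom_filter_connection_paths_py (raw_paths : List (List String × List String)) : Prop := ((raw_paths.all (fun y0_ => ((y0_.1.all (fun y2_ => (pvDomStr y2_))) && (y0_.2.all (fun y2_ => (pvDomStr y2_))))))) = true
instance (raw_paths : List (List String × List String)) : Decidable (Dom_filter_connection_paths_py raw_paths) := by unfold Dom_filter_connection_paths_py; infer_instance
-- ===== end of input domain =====

-- B fuses A's three passes (min, filter, dedup) into one online reset-driven pass over the input; same cost, different structure.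

-- ===== PORT A =====
-- the dedup loop of A: skip if the node signature was seen, else record it and append
def pvDedupA (acc : PySem.Set (List String) × List (List String × List String))
    (p : List String × List String) :
    PySem.Set (List String) × List (List String × List String) :=
  if PySem.Set.contains acc.1 p.1 then acc
  else (PySem.Set.add acc.1 p.1, acc.2 ++ [p])

def filter_connection_paths_py (raw_paths : List (List String × List String)) : List (List String × List String) :=
  match raw_paths with
  | [] => []
  | p :: rest =>
    let shortest_length := (rest.map (fun q => q.2.length)).foldl Nat.min p.2.length
    let filtered := (p :: rest).filter (fun q => q.2.length == shortest_length)
    (filtered.foldl pvDedupA (PySem.Set.empty, [])).2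

-- ===== PORT B =====
-- one step of B's single pass: state = (current_min (none = not set yet), seen, unique)
def pvStepB (st : Option Nat × PySem.Set (List String) × List (List String × List String))
    (p : List String × List String) :
    Option Nat × PySem.Set (List String) × List (List String × List String) :=
  let n := p.2.length
  match st.1 with
  | none => (some n, PySem.Set.add PySem.Set.empty p.1, [p])
  | some m =>
    if n < m then (some n, PySem.Set.add PySem.Set.empty p.1, [p])
    else if n = m then
      (if PySem.Set.contains st.2.1 p.1 then st
       else (some m, PySem.Set.add st.2.1 p.1, st.2.2 ++ [p]))
    else st

def filter_connection_paths_py_alt (raw_paths : List (List String × List String)) : List (List String × List String) :=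
  (raw_paths.foldl pvStepB (none, PySem.Set.empty, [])).2.2

-- ===== PRECONDITION & SPEC =====
def Spec_filter_connection_paths_py (raw_paths : List (List String × List String)) (out : List (List String × List String)) : Prop := out = filter_connection_paths_py_alt raw_paths
instance (raw_paths : List (List String × List String)) (out : List (List String × List String)) : Decidable (Spec_filter_connection_paths_py raw_paths out) := by unfold Spec_filter_connection_paths_py; infer_instance

-- ===== CLAIM (what is proved, stated in full; the proofs are below) =====
def Claim_equal_filter_connection_paths_py : Prop := ∀ (raw_paths : List (List String × List String)), Dom_filter_connection_paths_py raw_paths → Spec_filter_connection_paths_py raw_paths (filter_connection_paths_py raw_paths)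

-- ===== LEMMAS AND PROOFS =====

theorem foldl_min_le_init (l : List Nat) (a : Nat) : l.foldl Nat.min a ≤ a := by
  induction l generalizing a with
  | nil => simp
  | cons x xs ih => exact le_trans (ih _) (Nat.min_le_left _ _)

theorem foldl_min_le_mem (l : List Nat) (a b : Nat) (hb : b ∈ l) : l.foldl Nat.min a ≤ b := by
  induction l generalizing a with
  | nil => simp at hb
  | cons x xs ih =>
    rcases List.mem_cons.mp hb with h | h
    · subst h
      simp only [List.foldl_cons]
      exact le_trans (foldl_min_le_init xs _) (Nat.min_le_right _ _)
    · exact ih _ h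

theorem pvStepB_inv (p : List String × List String) (rest : List (List String × List String)) :
    (p :: rest).foldl pvStepB (none, PySem.Set.empty, []) =
      (some ((rest.map (fun q => q.2.length)).foldl Nat.min p.2.length),
       ((p :: rest).filter
          (fun q => q.2.length == (rest.map (fun q => q.2.length)).foldl Nat.min p.2.length)).foldl
         pvDedupA (PySem.Set.empty, [])) := by
  induction rest using List.reverseRecOn with
  | nil =>
    simp [pvStepB, pvDedupA, PySem.Set.contains, PySem.Set.empty, PySem.Set.add]
  | append_singleton l x ih =>
    have hmin : ((l ++ [x]).map (fun q => q.2.length)).foldl Nat.min p.2.length =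
        Nat.min ((l.map (fun q => q.2.length)).foldl Nat.min p.2.length) x.2.length := by
      simp [List.foldl_append]
    set m := (l.map (fun q => q.2.length)).foldl Nat.min p.2.length with hm
    have hfold : (p :: (l ++ [x])).foldl pvStepB (none, PySem.Set.empty, []) =
        pvStepB ((p :: l).foldl pvStepB (none, PySem.Set.empty, [])) x := by
      rw [show p :: (l ++ [x]) = (p :: l) ++ [x] by simp, List.foldl_append]
      rfl
    -- every element of p :: l has edge length ≥ m
    have hge : ∀ q ∈ p :: l, m ≤ q.2.length := by
      intro q hq
      rcases List.mem_cons.mp hq with h | h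
      · subst h; exact foldl_min_le_init _ _
      · exact foldl_min_le_mem _ _ _ (List.mem_map_of_mem h)
    rw [hfold, ih]
    by_cases hlt : x.2.length < m
    · have hm' : Nat.min m x.2.length = x.2.length := Nat.min_eq_right (le_of_lt hlt)
      have hnil : (p :: l).filter (fun q => q.2.length == x.2.length) = [] := by
        apply List.filter_eq_nil_iff.mpr
        intro q hq
        simp only [beq_iff_eq]
        have := hge q hq
        omega
      rw [show p :: (l ++ [x]) = (p :: l) ++ [x] by simp]
      rw [hmin, hm', List.filter_append, hnil]
      simp [pvStepB, pvDedupA, hlt, PySem.Set.contains, PySem.Set.empty, PySem.Set.add]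
    · by_cases heq : x.2.length = m
      · have hm' : Nat.min m x.2.length = m := by rw [heq]; exact Nat.min_self m
        rw [show p :: (l ++ [x]) = (p :: l) ++ [x] by simp]
        rw [hmin, hm', List.filter_append]
        have : List.filter (fun q => q.2.length == m) [x] = [x] := by
          simp [heq]
        rw [this, List.foldl_append]
        simp only [List.foldl_cons, List.foldl_nil]
        simp only [pvStepB, pvDedupA, heq, PySem.Set.contains]
        simp only [if_true]
        split
        · exfalso; omega
        · split <;> rfl
      · have hm' : Nat.min m x.2.length = m := Nat.min_eq_left (by omega)
        rw [show p :: (l ++ [x]) = (p :: l) ++ [x] by simp]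
        rw [hmin, hm', List.filter_append]
        have : List.filter (fun q => q.2.length == m) [x] = [] := by
          simp [heq]
        rw [this, List.append_nil]
        simp [pvStepB, hlt, heq]

-- ===== VERDICT (by name: the statement is the Claim_ definition above) =====
theorem filter_connection_paths_py_spec : Claim_equal_filter_connection_paths_py := by
  intro raw_paths _
  unfold Spec_filter_connection_paths_py
  cases raw_paths with
  | nil => rfl
  | cons p rest =>
    unfold filter_connection_paths_py filter_connection_paths_py_alt
    rw [pvStepB_inv]
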